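-- pv_equiv track=rewrite | github.com/azanbinzahid/google-kickstart-2022 | RoundE/p1.py | solve
-- ===== SOURCE A (Python) =====
-- def solve(N):
--     bot = 1
--     john = 0
--     for i in range(1, N):
--         if i%2==0:
--             continue
--         else:
--             if bot < john:
--                 bot +=1
--             else:
--                 john +=1
--     return bot
-- ===== SOURCE B (Python) =====
-- def solve(N):
--     # closed form: the loop touches only the k = max(0, N//2) odd indices in
--     # range(1, N); john gets the first two increments and then they alternate,
--     # so bot ends at 1 + max(0, (k-1)//2).
--     k = max(0, N // 2)
--     return 1 + max(0, (k - 1) // 2)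
-- ===== Notes on version B (the rewrite author's own statement) =====
-- stated objective: faster
-- what changed: Replaces the O(N) simulation of the bot/john counter loop with a closed-form arithmetic formula derived from the count of odd indices.
import Mathlib
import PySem

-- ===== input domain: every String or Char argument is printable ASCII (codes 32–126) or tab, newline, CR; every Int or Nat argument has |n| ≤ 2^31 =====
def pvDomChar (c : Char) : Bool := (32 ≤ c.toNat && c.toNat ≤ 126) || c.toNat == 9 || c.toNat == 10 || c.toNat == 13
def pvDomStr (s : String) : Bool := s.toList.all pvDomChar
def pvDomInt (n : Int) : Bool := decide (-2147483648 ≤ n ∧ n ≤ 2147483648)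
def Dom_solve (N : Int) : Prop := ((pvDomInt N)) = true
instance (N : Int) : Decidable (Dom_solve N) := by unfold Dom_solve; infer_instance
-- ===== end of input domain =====

-- B replaces A's O(N) loop simulation by a closed-form O(1) arithmetic formula (faster, asymptotic).

-- ===== PORT A =====
def solveStep (st : Int × Int) (i : Int) : Int × Int :=
  if PySem.Int.mod i 2 = 0 then st
  else if st.1 < st.2 then (st.1 + 1, st.2) else (st.1, st.2 + 1)

def solve (N : Int) : Int :=
  ((PySem.List.pyRange 1 N 1).foldl solveStep (1, 0)).1

-- ===== PORT B =====
def solve_alt (N : Int) : Int :=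
  let k := max 0 (PySem.Int.floordiv N 2)
  1 + max 0 (PySem.Int.floordiv (k - 1) 2)

-- ===== PRECONDITION & SPEC =====
def Spec_solve (N : Int) (out : Int) : Prop := out = solve_alt N
instance (N : Int) (out : Int) : Decidable (Spec_solve N out) := by unfold Spec_solve; infer_instance

-- ===== CLAIM (what is proved, stated in full; the proofs are below) =====
def Claim_equal_solve : Prop := ∀ (N : Int), Dom_solve N → Spec_solve N (solve N)

-- ===== LEMMAS AND PROOFS =====

theorem solve_alt_eq (N : Int) :
    solve_alt N = 1 + max 0 (PySem.Int.floordiv (max 0 (PySem.Int.floordiv N 2) - 1) 2) := rfl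

-- closed form of the loop state after processing range(1, n)
def loopState (n : Nat) : Int × Int :=
  if n < 2 then (1, 0)
  else ((((n / 2 + 1) / 2 : Nat) : Int), ((n / 2 / 2 + 1 : Nat) : Int))

theorem mod_cast2 (n : Nat) : PySem.Int.mod (n : Int) 2 = ((n % 2 : Nat) : Int) := by
  exact_mod_cast PySem.Int.mod_natCast n 2

theorem loop_closed (n : Nat) :
    (PySem.List.pyRange 1 (n : Int) 1).foldl solveStep (1, 0) = loopState n := by
  induction n with
  | zero => simp [PySem.List.pyRange_one_eq_nil (by norm_num : (0:Int) ≤ 1), loopState]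
  | succ n ih =>
    rcases Nat.lt_or_ge n 2 with hs | hn2
    · interval_cases n
      · simp [PySem.List.pyRange_one_eq_nil (by norm_num : (1:Int) ≤ 1), loopState]
      · norm_num
        decide
    · have hL : loopState n = ((((n / 2 + 1) / 2 : Nat) : Int), ((n / 2 / 2 + 1 : Nat) : Int)) := by
        unfold loopState; rw [if_neg (show ¬ n < 2 by omega)]
      have hR : loopState (n + 1) =
          (((((n+1) / 2 + 1) / 2 : Nat) : Int), (((n+1) / 2 / 2 + 1 : Nat) : Int)) := by
        unfold loopState; rw [if_neg (show ¬ n + 1 < 2 by omega)]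
      have hcast : ((n : Int) + 1) = ((n + 1 : Nat) : Int) := by push_cast; ring
      rw [← hcast, PySem.List.pyRange_one_succ_right (by exact_mod_cast Nat.one_le_iff_ne_zero.mpr (by omega)),
        List.foldl_append, ih, hL, hR]
      simp only [List.foldl_cons, List.foldl_nil, solveStep, mod_cast2 n]
      set k := n / 2 with hk
      rcases Nat.even_or_odd n with he | ho
      · -- n even: the loop skips i = n
        have h2 : n % 2 = 0 := Nat.even_iff.mp he
        rw [if_pos (by rw [h2]; rfl)]
        have : (n + 1) / 2 = k := by omega
        rw [this]
      · -- n odd: one balancing step at i = n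
        have h2 : n % 2 = 1 := Nat.odd_iff.mp ho
        rw [if_neg (by rw [h2]; exact one_ne_zero)]
        have hk' : (n + 1) / 2 = k + 1 := by omega
        rw [hk']
        rcases Nat.even_or_odd k with hke | hko
        · -- k even: bot < john, bot += 1
          have hkk : k % 2 = 0 := Nat.even_iff.mp hke
          have hk1 : 1 ≤ k := by omega
          rw [if_pos (show (((k + 1) / 2 : Nat) : Int) < ((k / 2 + 1 : Nat) : Int) by
            exact_mod_cast (show (k + 1) / 2 < k / 2 + 1 by omega))]
          simp only [Prod.mk.injEq]
          constructor <;> · push_cast; omega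
        · -- k odd: bot = john, john += 1
          have hkk : k % 2 = 1 := Nat.odd_iff.mp hko
          rw [if_neg (show ¬ (((k + 1) / 2 : Nat) : Int) < ((k / 2 + 1 : Nat) : Int) by
            exact_mod_cast (show ¬ (k + 1) / 2 < k / 2 + 1 by omega))]
          simp only [Prod.mk.injEq]
          constructor <;> · push_cast; omega

theorem floordiv_nonpos (N : Int) (h : N ≤ 1) : PySem.Int.floordiv N 2 ≤ 0 := by
  have := (PySem.Int.floordiv_lt_iff_lt_mul (a := N) (b := 2) (q := 1) (by norm_num)).mpr (by omega)
  omega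

-- ===== VERDICT (by name: the statement is the Claim_ definition above) =====
theorem solve_spec : Claim_equal_solve := by
  unfold Claim_equal_solve
  intro N _
  unfold Spec_solve solve
  rw [solve_alt_eq]
  rcases le_or_gt N 1 with h | h
  · rw [PySem.List.pyRange_one_eq_nil h]
    simp only [List.foldl_nil]
    have h0 : max 0 (PySem.Int.floordiv N 2) = 0 := by
      have := floordiv_nonpos N h; omega
    rw [h0]
    decide
  · obtain ⟨n, rfl⟩ : ∃ n : Nat, N = (n : Int) := ⟨N.toNat, by omega⟩
    rw [loop_closed n]
    have hn2 : 2 ≤ n := by exact_mod_cast h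
    unfold loopState
    rw [if_neg (by omega)]
    have hfd : PySem.Int.floordiv (n : Int) 2 = ((n / 2 : Nat) : Int) := by
      exact_mod_cast PySem.Int.floordiv_natCast n 2
    rw [hfd]
    set k := n / 2 with hk
    have hk1 : 1 ≤ k := by omega
    have hmax : max 0 ((k : Int)) = (k : Int) := by omega
    rw [hmax]
    have hc : ((k : Int) - 1) = ((k - 1 : Nat) : Int) := by omega
    rw [hc, show PySem.Int.floordiv ((k - 1 : Nat) : Int) 2 = (((k - 1) / 2 : Nat) : Int) by
      exact_mod_cast PySem.Int.floordiv_natCast (k - 1) 2]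
    have hmax2 : max 0 ((((k - 1) / 2 : Nat)) : Int) = (((k - 1) / 2 : Nat) : Int) := by omega
    rw [hmax2]
    show ((((k + 1) / 2 : Nat)) : Int) = 1 + (((k - 1) / 2 : Nat) : Int)
    push_cast
    omega
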